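-- pv_equiv track=rewrite | github.com/jyooru/nix-minecraft-servers | nix_minecraft_servers/common.py | group_major_versions
-- ===== SOURCE A (Python) =====
-- from typing import Any, Dict, List
--
-- def get_major_release(version: str) -> str:
--     """
--     Return the major release for a version. The major release for 1.17 and
--     1.17.1 is 1.17.
--     """
--     if not len(version.split(".")) >= 2:
--         raise ValueError(f"version not in expected format: '{version}'")
--     return ".".join(version.split(".")[:2])
--
-- def group_major_versions(versions: List[str]) -> Dict[str, List[str]]:
--     """
--     Return a dictionary containing each version grouped by each major version.
--     The key "1.17" contains a list with two strings, one for "1.17" and another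
--     for "1.17.1".
--     """
--     groups: Dict[str, List[str]] = {}
--     for version in versions:
--         major_version = get_major_release(version)
--         if major_version not in groups:
--             groups[major_version] = []
--         groups[major_version].append(version)
--     return groups
-- ===== SOURCE B (Python) =====
-- from typing import Dict, List
--
--
-- def get_major_release(version: str) -> str:
--     parts = version.split(".")
--     if len(parts) < 2:
--         raise ValueError(f"version not in expected format: '{version}'")
--     return ".".join(parts[:2])
--
--
-- def group_major_versions(versions: List[str]) -> Dict[str, List[str]]:
--     # Two-pass: compute every major once, dedupe in first-appearance order,
--     # then build each group by filtering the (version, major) pairs.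
--     majors = [get_major_release(v) for v in versions]
--     seen: List[str] = []
--     for m in majors:
--         if m not in seen:
--             seen.append(m)
--     return {m: [v for v, mv in zip(versions, majors) if mv == m] for m in seen}
-- ===== Notes on version B (the rewrite author's own statement) =====
-- stated objective: alternative
-- what changed: A builds the groups incrementally in one pass over a dict; B computes all major keys once, dedupes them in first-appearance order, and then builds each group by filtering the (version, major) pairs per key.
import Mathlib
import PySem

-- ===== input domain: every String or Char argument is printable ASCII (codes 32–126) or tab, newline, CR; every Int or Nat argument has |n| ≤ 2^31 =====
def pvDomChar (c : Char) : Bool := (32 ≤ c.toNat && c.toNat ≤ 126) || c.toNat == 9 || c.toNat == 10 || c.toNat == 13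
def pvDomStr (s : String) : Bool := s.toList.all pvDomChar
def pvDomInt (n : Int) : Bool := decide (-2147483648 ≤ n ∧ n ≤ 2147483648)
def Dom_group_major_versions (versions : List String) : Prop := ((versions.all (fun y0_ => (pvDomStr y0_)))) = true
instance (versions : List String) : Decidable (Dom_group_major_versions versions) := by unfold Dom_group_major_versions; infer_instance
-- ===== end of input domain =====

-- B replaces A's incremental dict accumulation by dedup-majors-then-filter-per-group (alternative
-- decomposition, same observable result; not claimed faster).

-- ===== PORT A =====
-- get_major_release: identical helper in Source A and Source B, shared by both ports.
-- Its ValueError branch (fewer than two '.'-separated parts) is excluded by Pre_ below;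
-- on excluded inputs this total definition's value is never claimed.
def get_major_release (version : String) : String :=
  PySem.Str.join "." (PySem.List.slice ((PySem.Str.split? version ".").getD []) none (some 2))

def group_major_versions (versions : List String) : List (String × List String) :=
  (versions.foldl
    (fun (groups : PySem.Dict String (List String)) version =>
      let major_version := get_major_release version
      let groups := if groups.contains major_version then groups
                    else groups.insert major_version []
      groups.modify major_version [] (fun xs => xs ++ [version]))
    PySem.Dict.empty).items

-- ===== PORT B =====
def group_major_versions_alt (versions : List String) : List (String × List String) :=
  let majors := versions.map get_major_release
  let seen := majors.foldl (fun (s : List String) m => if s.contains m then s else s ++ [m]) []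
  seen.map (fun m =>
    (m, ((versions.zip majors).filter (fun p => p.2 == m)).map (fun p => p.1)))

-- ===== PRECONDITION & SPEC =====
-- Pre_ excludes exactly the inputs on which the Python A raises ValueError:
-- some version has fewer than two '.'-separated parts.
def Pre_group_major_versions (versions : List String) : Prop :=
  ∀ v ∈ versions, 2 ≤ ((PySem.Str.split? v ".").getD []).length
instance (versions : List String) : Decidable (Pre_group_major_versions versions) := by
  unfold Pre_group_major_versions; infer_instance
def pvWitness_group_major_versions : List String := ["1.17", "1.17.1", "1.18"]
def Spec_group_major_versions (versions : List String) (out : List (String × List String)) : Prop := out = group_major_versions_alt versions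
instance (versions : List String) (out : List (String × List String)) : Decidable (Spec_group_major_versions versions out) := by unfold Spec_group_major_versions; infer_instance

-- ===== CLAIM (what is proved, stated in full; the proofs are below) =====
def Claim_equal_group_major_versions : Prop := ∀ (versions : List String), Dom_group_major_versions versions → Pre_group_major_versions versions → Spec_group_major_versions versions (group_major_versions versions)

-- ===== LEMMAS AND PROOFS =====

-- A's loop body collapses to a single modify: inserting [] first changes nothing observable.
theorem gmv_step_eq (g : PySem.Dict String (List String)) (version : String) :
    (let m := get_major_release version
     let g' := if g.contains m then g else g.insert m []
     g'.modify m [] (fun xs => xs ++ [version]))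
    = g.modify (get_major_release version) [] (fun xs => xs ++ [version]) := by
  set m := get_major_release version
  by_cases h : g.contains m
  · simp [h]
  · have h' : g.contains m = false := by simpa using h
    simp [h', PySem.Dict.modify, PySem.Dict.insert_insert_self,
      PySem.Dict.getD_insert_self, PySem.Dict.getD_of_not_contains]

theorem zip_map_self {α β : Type} (f : α → β) (l : List α) :
    l.zip (l.map f) = l.map (fun a => (a, f a)) := by
  induction l with
  | nil => rfl
  | cons x xs ih => simp [ih]

-- ===== VERDICT =====
theorem group_major_versions_spec : Claim_equal_group_major_versions := by
  intro versions _ _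
  unfold Spec_group_major_versions group_major_versions group_major_versions_alt
  -- collapse A's loop body
  have hfold :
      versions.foldl
        (fun (groups : PySem.Dict String (List String)) version =>
          let major_version := get_major_release version
          let groups := if groups.contains major_version then groups
                        else groups.insert major_version []
          groups.modify major_version [] (fun xs => xs ++ [version]))
        PySem.Dict.empty
      = versions.foldl
          (fun (g : PySem.Dict String (List String)) v =>
            g.modify (get_major_release v) [] (fun xs => xs ++ [v]))
          PySem.Dict.empty := by
    apply PySem.List.foldl_congr_mem
    intro g v _
    exact gmv_step_eq g v
  rw [hfold]
  set d := versions.foldl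
      (fun (g : PySem.Dict String (List String)) v =>
        g.modify (get_major_release v) [] (fun xs => xs ++ [v]))
      PySem.Dict.empty with hd
  have hnodup : d.keys.Nodup := by
    rw [hd]
    exact PySem.Dict.nodup_keys_foldl_modify_key versions get_major_release []
      (fun _ v xs => xs ++ [v]) PySem.Dict.empty (by simp)
  have hkeys : d.keys
      = (versions.map get_major_release).foldl
          (fun (s : List String) m => if s.contains m then s else s ++ [m]) [] := by
    rw [hd,
      PySem.Dict.keys_foldl_modify_key versions get_major_release []
        (fun _ v xs => xs ++ [v]) PySem.Dict.empty]
    rfl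
  have hgetD : ∀ m, d.getD m []
      = (versions.filter (fun v => get_major_release v == m)) := by
    intro m
    have hmap : (versions.map (fun v => (get_major_release v, v))).foldl
        (fun (g : PySem.Dict String (List String)) p =>
          g.modify p.1 [] (fun xs => xs ++ [p.2])) PySem.Dict.empty = d := by
      rw [hd, List.foldl_map]
    rw [← hmap, PySem.Dict.getD_foldl_modify_append]
    simp [List.filter_map, Function.comp_def]
  rw [PySem.Dict.items_eq_map_keys d hnodup [], hkeys]
  apply List.map_congr_left
  intro m _
  rw [hgetD m, zip_map_self get_major_release versions]
  simp [List.filter_map, Function.comp_def]
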